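/-
  Vorbis/Spec/StartDecoderRes.lean — THE CARRY OF THE RESIDUE LOOP'S INVARIANT (start_decoder, loop 4043, segments R3 … R7)

  WHAT IT IS FOR.  Every cut point inside the body of loop 4043 asserts `ResLoop u₀ g pc i zfrom A6 A6c Ai A v`
  (Vorbis/Spec/StartDecoderB.lean) = `Frame` + `Hand` + `Mid g 6 6 7 A6 A` + `i ≤ residue_count` + `ResTrans` (RES(i) with the ages
  of its blocks) + `ResidueZeroFrom`.  Vorbis/Spec/StartDecoderMid.lean carries the first three over a footprint (`Frame.carry_sec`,
  `Mid.carry`); the section's own transient had NO frame lemma in the tree (the workers of R2, R3 and R4 each wrote one: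
  `resTrans_frame`, `zero_frame` of work/start_decoder.R4.1/Lemmas.lean are the source of §1 here).  This file does it once:

      Res.wins i                     the windows of `*f` that RES(i) reads: `codebook_count`, `codebooks`; `residue_count`,
                                     `residue_types[0 .. i)`; `residue_config`
      Res.count_same … Res.at_same   the single fields over `ObjEq (Res.wins i)`
      ResTrans.carry_obj             `ResTrans` over a change of memory (fields, finished records, codebooks block, finished blocks kept)
      Res.zero_carry                 `ResidueZeroFrom` over a change of memory (`classdata` of every record kept)
      ResCur.carry_obj               the record under construction (`ResCur`, any stage) over a change of memory (record `i`, its class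
                                     book's header and — from stage 6 — `residue_books` kept)
      ResWin g i r Ai A w            WHAT A STEP INSIDE ITERATION i MAY WRITE: the windows of `MidWin g 6 7` minus the section's assigned
                                     fields, plus `residue_types[i ..]`, plus record `i` of `residue_config` except its `classdata`
                                     field, plus any block allocated since the head of the iteration (`Young Ai A`)
      ResLoop.carry                  THE CARRY LEMMA: `ResLoop` from a cut point `v` to a state `w` over ONE footprint
                                     `Mem.SameExcept ws v.mem w.mem` whose every window is a `ResWin`
      ResLoop.rec_kept               record `i` is kept by a step that does not write into it (the `hr` of `ResCur.carry_obj`)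
      ResLoop.carry_spill            … or lies in the spill slot `[R + 18H, R + 20H)` (R5's `k`, R7's `temp` / returned pointer): the
                                     frame constants around it are re-established inside

  HOW A SEGMENT USES IT (the state after `call get_bits`, a checked store into record `i`, a store into `residue_books` / a row):
      have hs : Mem.SameExcept [ … ] v.mem s_<addr>r.mem := by u_same
      have hws : ∀ x, x ∈ [ … ] → ResWin g i (resAt g v.mem i) Ai A x := by
        intro x hx ; simp only [List.mem_cons, List.mem_nil_iff, or_false] at hx ; unfold ResWin
        rcases hx with rfl | rfl | … ; all_goals simp only [] ; all_goals omega          -- a young block: the last arm, `Young.of_since`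
      have hloop' := hloop.carry hlt hs hun hws hbits w_rip w_rsp hcodeok w_inv
  NOT COVERED (the segment's own business): the store of `classdata` (R6b: it ENDS `ResidueZeroFrom i`), a spill into the frame
  constants' range `[R + 10H, R + 28H)` OTHER than `[R + 18H, R + 20H)` (none in R3 … R7), a successful `setup_malloc` (`SecPt.alloc_call` for the point, `ResTrans.carry_obj`
  with `AllKept A.1.Blk` for the transient).
-/
import Vorbis.Spec.StartDecoderMid
namespace Vorbis.Spec.StartDecoder
open X86 X86.User Asan

set_option maxRecDepth 100000
set_option maxHeartbeats 4000000

/-! ### 1. The transient of the residue section over a change of memory -/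

/-- **The windows of `*f` that RES(i) reads**: `codebook_count`, `codebooks` (`[160, 176)`: the class books of the finished
records); `residue_count` and `residue_types[i']`, `i' < i` (`[320, 324 + 2i)`); `residue_config` (`[456, 464)`). The types from `i` on
are NOT in it: R3 stores `residue_types[i]`. -/
def Res.wins (i : Nat) : Wins := [(160, 176), (320, 324 + 2 * i), (456, 464)]

/-- `residue_count` reads the same. -/
theorem Res.count_same {mem mem' : Mem} {f i : Nat} (he : ObjEq (Res.wins i) mem f mem' f) :
    stb_vorbis.residue_count mem' f = stb_vorbis.residue_count mem f := by
  simp only [vacc, voff]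
  apply he.i32 320
  refine InWins.of_mem (320, 324 + 2 * i) (List.mem_cons_of_mem _ List.mem_cons_self) ?_ ?_
  · show 320 ≤ 320
    omega
  · show 320 + 4 ≤ 324 + 2 * i
    omega

/-- `residue_config` reads the same. -/
theorem Res.config_same {mem mem' : Mem} {f i : Nat} (he : ObjEq (Res.wins i) mem f mem' f) :
    stb_vorbis.residue_config mem' f = stb_vorbis.residue_config mem f := by
  simp only [vacc, voff]
  apply he.u64 456
  refine InWins.of_mem (456, 464) (List.mem_cons_of_mem _ (List.mem_cons_of_mem _ List.mem_cons_self)) ?_ ?_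
  · show 456 ≤ 456
    omega
  · show 456 + 8 ≤ 464
    omega

/-- `r(i') = residue_config + 32·i'` does not move. -/
theorem Res.at_same {mem mem' : Mem} {f i : Nat} (he : ObjEq (Res.wins i) mem f mem' f) (i' : Nat) :
    stb_vorbis.residue_config_at mem' f i' = stb_vorbis.residue_config_at mem f i' := by
  unfold stb_vorbis.residue_config_at
  rw [Res.config_same he]

/-- `r(i)` of the bodies does not move. -/
theorem Res.resAt_same {g : Ghost} {mem mem' : Mem} {i : Nat} (he : ObjEq (Res.wins i) mem g.f mem' g.f) (i' : Nat) :
    resAt g mem' i' = resAt g mem i' := by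
  unfold resAt
  exact Res.at_same he i'

/-- `residue_types[i']` of a finished record reads the same. -/
theorem Res.types_same {mem mem' : Mem} {f i : Nat} (he : ObjEq (Res.wins i) mem f mem' f) (i' : Nat) (hi : i' < i)
    (h64 : i' < 64) : stb_vorbis.residue_types mem' f i' = stb_vorbis.residue_types mem f i' := by
  simp only [vacc, voff]
  have hw : InWins (Res.wins i) (324 + 2 * i') 2 := by
    refine InWins.of_mem (320, 324 + 2 * i) (List.mem_cons_of_mem _ List.mem_cons_self) ?_ ?_
    · show 320 ≤ 324 + 2 * i'
      omega
    · show 324 + 2 * i' + 2 ≤ 324 + 2 * i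
      omega
  exact he.u16_at (324 + 2 * i') hw (by omega) (by omega)

/-- `codebook_count` reads the same. -/
theorem Res.cbcount_same {mem mem' : Mem} {f i : Nat} (he : ObjEq (Res.wins i) mem f mem' f) :
    stb_vorbis.codebook_count mem' f = stb_vorbis.codebook_count mem f := by
  simp only [vacc, voff]
  apply he.i32 160
  refine InWins.of_mem (160, 176) List.mem_cons_self ?_ ?_
  · show 160 ≤ 160
    omega
  · show 160 + 4 ≤ 176
    omega

/-- **`ResTrans` (RES(i) with the ages of its blocks) OVER A CHANGE OF MEMORY**: the windows `Res.wins i` of `*f` read the same,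
the finished records (32 bytes each), the codebooks block (the class books' headers) and every block allocated between `A6c` and
`Ai` (the finished records' `residue_books`, `classdata`, rows) are kept. From the worker's `resTrans_frame` of start_decoder.R4. -/
theorem ResTrans.carry_obj {A6 A6c Ai A : Arena} {mem mem' : Mem} {f i : Nat} (h : ResTrans A6 A6c Ai A mem f i)
    (he : ObjEq (Res.wins i) mem f mem' f)
    (hrec : ∀ i', i' < i → (Block.mk (stb_vorbis.residue_config_at mem f i') Off.sizeof.Residue).Kept mem mem')
    (hcb : (codebooksBlock mem f).Kept mem mem')
    (hyoung : ∀ B, Since A6c Ai B → B.Kept mem mem') : ResTrans A6 A6c Ai A mem' f i := by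
  have ecount := Res.count_same he
  have econf := Res.config_same he
  have h1 := h.R1
  have hle := h.n_le
  refine ⟨h.ext6, h.ext6c, h.exti, ?_, ?_, ?_, ?_, ?_⟩
  · rw [ecount]
    exact h.n_le
  · rw [ecount]
    exact h.R1
  · rw [ecount, econf]
    exact h.R2
  · intro i' hi'
    rw [Res.types_same he i' hi' (by omega)]
    exact h.R3 i' hi'
  · intro i' hi'
    rw [Res.at_same he i']
    have hr := h.record i' hi'
    have h7 := hr.R7
    have hcbk : (Block.mk (Residue.cbk mem f (stb_vorbis.residue_config_at mem f i')) 8).Kept mem mem' := by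
      apply hcb.mono
      · simp only [vacc, voff]
        omega
      · simp only [vacc, voff] at h7 ⊢
        omega
    have he' : ObjEq ResidueAtOK.wins mem f mem' f := by
      apply he.sub
      intro w hw
      simp only [ResidueAtOK.wins, List.mem_cons, List.mem_nil_iff, or_false] at hw
      subst hw
      exact ⟨(160, 176), List.mem_cons_self, Nat.le_refl _, Nat.le_refl _⟩
    have hrd := ResidueReads.of_kept he' (hrec i' hi') hcbk
    apply hr.frame hrd
    · intro B hO
      cases hO with
      | books => exact hyoung _ hr.R8
      | classdata => exact hyoung _ hr.R8a
      | row q hq => exact hyoung _ (hr.R8a_row q hq)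
    · intro B _ hB
      exact hB

/-- **`ResidueZeroFrom` OVER A CHANGE OF MEMORY**: the `classdata` field (8 bytes at `r + 16`) of every record reads the same.
From the worker's `zero_frame` of start_decoder.R4. -/
theorem Res.zero_carry {mem mem' : Mem} {f n i : Nat} (h : ResidueZeroFrom mem f n) (he : ObjEq (Res.wins i) mem f mem' f)
    (hcd : ∀ i' : Nat, (i' : Int) < stb_vorbis.residue_count mem f →
      (Block.mk (stb_vorbis.residue_config_at mem f i' + 16) 8).Kept mem mem') : ResidueZeroFrom mem' f n := by
  intro i' hn hi'
  rw [Res.count_same he] at hi'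
  rw [Res.at_same he i']
  have e : Residue.classdata mem' (stb_vorbis.residue_config_at mem f i') =
      Residue.classdata mem (stb_vorbis.residue_config_at mem f i') := by
    simp only [vacc, voff]
    exact (hcd i' hi').u64 _ (Nat.le_refl _) (Nat.le_refl _)
  rw [e]
  exact h i' hn hi'

/-- `Res.wins` is the window list of the owners' transient `ResidueUpTo` (Vorbis/ResidueMapping/ResidueFrame.lean). -/
example (i : Nat) : Res.wins i = ResidueUpTo.wins i := rfl

/-- **THE RECORD UNDER CONSTRUCTION (`ResCur`, any stage) OVER A CHANGE OF MEMORY**: the windows of `*f` up to `residue_types[i]`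
read the same (`Res.wins (i + 1)`), the 32 bytes of record `i` and the header of its class book (8 bytes: `dimensions`, `entries`)
are kept, from stage 6 on the `residue_books` block is kept (R8c reads its slots); the block predicates may be weakened
(`hPk`, `hPd`: `Since.mono` when the arena grew, `fun _ h => h` else). A store INTO the record or into `residue_books` is the
segment's own step (`ResBooksUpTo.step`, the field clauses from the stored value): this lemma is for everything else (a call
return, a store into another block). From the worker's `resCur_frame` of start_decoder.R4 (stage 4), for all stages. -/
theorem ResCur.carry_obj {g : Ghost} {Pk Pd Pk' Pd' : Block → Prop} {mem mem' : Mem} {i stage : Nat}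
    (h : ResCur g Pk Pd mem i stage) (he : ObjEq (Res.wins (i + 1)) mem g.f mem' g.f) (h64 : i < 64)
    (hr : (Block.mk (resAt g mem i) Off.sizeof.Residue).Kept mem mem')
    (hcbk : (Block.mk (Residue.cbk mem g.f (resAt g mem i)) 8).Kept mem mem')
    (hbooks : 6 ≤ stage → (Block.mk (Residue.residue_books mem (resAt g mem i))
      (16 * Residue.classifications mem (resAt g mem i))).Kept mem mem')
    (hPk : ∀ B, Pk B → Pk' B) (hPd : ∀ B, Pd B → Pd' B) : ResCur g Pk' Pd' mem' i stage := by
  have er := Res.resAt_same he i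
  have he' : ObjEq ResidueAtOK.wins mem g.f mem' g.f := by
    apply he.sub
    intro w hw
    simp only [ResidueAtOK.wins, List.mem_cons, List.mem_nil_iff, or_false] at hw
    subst hw
    exact ⟨(160, 176), List.mem_cons_self, Nat.le_refl _, Nat.le_refl _⟩
  have hrd := ResidueReads.of_kept he' hr hcbk
  refine ⟨?_, ?_, ?_, ?_, ?_, ?_, ?_, ?_, ?_⟩
  · rw [Res.count_same he]
    exact h.lt
  · rw [Res.types_same he i (by omega) h64]
    exact h.R3
  · rw [er, hrd.begin, hrd.end_]
    exact h.R4
  · rw [er, hrd.part_size]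
    exact h.R5
  · rw [er, hrd.classifications]
    exact h.R6
  · rw [er, hrd.classbook, hrd.codebook_count]
    exact h.R7
  · intro h5
    rw [er, hrd.residue_books, hrd.classifications]
    exact hPk _ (h.R8 h5)
  · intro h6
    rw [er, hrd.classifications]
    apply (h.R8c h6).keep hrd.codebook_count
    intro j' k' hk' hlt
    exact Residue.book_kept hrd (hbooks h6) (by omega) hk'
  · intro h7
    rw [er, hrd.classdata, hrd.E]
    exact hPd _ (h.R8a h7)

/-! ### 2. What a step inside iteration `i` may write -/

/-- **A window that neither `Frame`, nor `Mid g 6 6 7`, nor RES(i), nor `ResidueZeroFrom` reads**, inside iteration `i` of loop 4043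
whose record is at `r` (`= resAt g mem i`): the stack below the frame's constants (a pushed return address, a callee's frame);
the own frame's free locals and protected objects `[R + 2CH, R + 598H)` (`residue_cascade` at `[R + C0H, R + 100H)`, the spills
`[R + 30H]`, `[R + 38H]`, `[R + 40H]`); the allocator's, the reader's and `error`'s fields of `*f`; `residue_types[i ..]`
(`[f + 324 + 2i, f + 452)`); the record `i` except its `classdata` pointer (`[r, r + 16)`: begin, end, part_size, classifications,
classbook; `[r + 24, r + 32)`: `residue_books`); a window in a block allocated since the head of the iteration (`Young Ai A`:
`residue_books`, `classdata`, a row — `Young.of_since` with `ResCur.R8` / `.R8a` / the allocator's `Since`). -/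
def ResWin (g : Ghost) (i r : Nat) (Ai : Arena) (A : Arena × List Obj) (w : Span) : Prop :=
  (g.R - 408 ≤ w.lo ∧ w.hi ≤ g.R + 8) ∨
  (g.R + 0x2c ≤ w.lo ∧ w.hi ≤ g.R + 0x598) ∨
  (g.f + 8 ≤ w.lo ∧ w.hi ≤ g.f + 24) ∨
  (g.f + 48 ≤ w.lo ∧ w.hi ≤ g.f + 112) ∨
  (g.f + 136 ≤ w.lo ∧ w.hi ≤ g.f + 152) ∨
  (g.f + 324 + 2 * i ≤ w.lo ∧ w.hi ≤ g.f + 452) ∨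
  (g.f + 1480 ≤ w.lo ∧ w.hi ≤ g.f + 1749) ∨
  (g.f + 1750 ≤ w.lo ∧ w.hi ≤ g.f + 1784) ∨
  (g.f + 1788 ≤ w.lo ∧ w.hi ≤ g.f + 1808) ∨
  (r ≤ w.lo ∧ w.hi ≤ r + 16) ∨
  (r + 24 ≤ w.lo ∧ w.hi ≤ r + 32) ∨
  Young Ai A w

/-- **A block of the arena that no window of a step meets is kept** (a window: a `ResWin`, or the spill slot `[R + 18H, R + 20H)`): the block lies in the arena's buffer (`hin`), it is a block of
the snapshot `Ai` (`hold`: every `Young Ai A` window misses it), and it is apart from the two writable parts of record `i`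
(`hrec`: outside the record, or inside its `classdata` field). -/
theorem Res.blk_kept {g : Ghost} {i r : Nat} {Ai : Arena} {A : Arena × List Obj} {m m' : Mem} {ws : List Span} (hp : Pos g A)
    (hs : Mem.SameExcept ws m m')
    (hok : ∀ x, x ∈ ws → ResWin g i r Ai A x ∨ (g.R + 0x18 ≤ x.lo ∧ x.hi ≤ g.R + 0x20)) {B : Block}
    (hin : A.1.B ≤ B.base ∧ B.base + B.size ≤ A.1.B + A.1.L)
    (hold : ∀ x, Young Ai A x → B.base + B.size ≤ x.lo ∨ x.hi ≤ B.base)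
    (hrec : (B.base + B.size ≤ r ∨ r + 32 ≤ B.base) ∨ (r + 16 ≤ B.base ∧ B.base + B.size ≤ r + 24)) : B.Kept m m' := by
  have p1 := hp.r_eq
  have p2 := hp.ra_lo
  have p3 := hp.ra_hi
  have p4 := hp.objOut
  have p5 := hp.ar_stack
  have p6 := hp.ar_hi
  apply Block.Kept.of_sameExcept hs
  · intro x hx
    rcases hok x hx with q | q
    · unfold ResWin at q
      rcases q with q | q | q | q | q | q | q | q | q | q | q | q
      · omega
      · omega
      · omega
      · omega
      · omega
      · omega
      · omega
      · omega
      · omega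
      · omega
      · omega
      · exact hold x q
    · omega
  · omega

/-! ### 3. The carry lemma -/

/-- **THE CARRY LEMMA OF THE RESIDUE LOOP, WITH THE SPILL SLOT `[R + 18H, R + 20H)`**: as `ResLoop.carry` (below: read its doc), and a
window may also lie in the slot `[R + 18H, R + 20H)` of the own frame — the counter `k` of R5's loop 4065, the returned pointer and
`temp` of R7. The slot lies in the frame constants' range `[R + 8, R + 28H)`, which `MidWin` excludes, but none of the constants
(`SDFrameConsts`: qword `[R + 8]`, byte `[R + 10H]`, dwords `[R + 20H]`, `[R + 24H]`) reads it: they are re-established here. -/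
theorem ResLoop.carry_spill {u₀ : State} {g : Ghost} {pc pc' : Word} {i zf : Nat} {A6 A6c Ai : Arena} {A : Arena × List Obj}
    {v w : State} {ws : List Span} (h : ResLoop u₀ g pc i zf A6 A6c Ai A v)
    (hlt : (i : Int) < stb_vorbis.residue_count v.mem g.f)
    (hs : Mem.SameExcept ws v.mem w.mem) (hun : ShadowUntouched v.mem w.mem)
    (hok : ∀ x, x ∈ ws → ResWin g i (resAt g v.mem i) Ai A x ∨ (g.R + 0x18 ≤ x.lo ∧ x.hi ≤ g.R + 0x20))
    (hbits : Bits (g.Blk A) g.len w.mem g.f)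
    (hrip : w.rip = pc') (hrsp : w.reg .rsp = addr g.R) (hcode : CodeOK u₀ w.mem) (hinv : abiInv w) :
    ResLoop u₀ g pc' i zf A6 A6c Ai A w := by
  have hp : Pos g A := Pos.of_mid h.frame h.hand h.mid
  have harena := h.mid.arena
  have hres := h.res
  have h1 := hres.R1
  have p1 := hp.r_eq
  have p2 := hp.ra_lo
  have p3 := hp.ra_hi
  have p4 := hp.objOut
  have p5 := hp.ar_stack
  have p6 := hp.ar_hi
  have p7 := hp.f_stack
  have p8 := hp.f_hi
  -- the `residue_config` table: a block of the arena, allocated since the configuration snapshot, a block of `Ai`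
  have hconfS : Since A6 A.1 ⟨stb_vorbis.residue_config v.mem g.f,
      Off.sizeof.Residue * (stb_vorbis.residue_count v.mem g.f).toNat⟩ := (hres.R2.mono hres.ext6c).mono hres.exti
  have hconfAi : Ai.Blk ⟨stb_vorbis.residue_config v.mem g.f,
      Off.sizeof.Residue * (stb_vorbis.residue_count v.mem g.f).toNat⟩ := hres.R2.1.mono hres.ext6c
  have hconfIn := arena_inside harena hconfS.1
  simp only [] at hconfIn
  -- the record of the iteration inside it
  have hr : resAt g v.mem i = stb_vorbis.residue_config v.mem g.f + 32 * i := by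
    simp only [resAt, vacc, voff]
  have hsz : Off.sizeof.Residue = 32 := by
    simp only [voff]
  rw [hsz] at hconfS hconfAi hconfIn
  have hrIn : stb_vorbis.residue_config v.mem g.f ≤ resAt g v.mem i ∧
      resAt g v.mem i + 32 ≤ stb_vorbis.residue_config v.mem g.f + 32 * (stb_vorbis.residue_count v.mem g.f).toNat := by
    rw [hr]
    omega
  -- a window of the step is a window of `Mid g 6 6 7`
  have e320 : Mid.hi 6 = 320 := by decide
  have e464 : restFrom 7 = 464 := by decide
  have hmw0 : ∀ x, ResWin g i (resAt g v.mem i) Ai A x → MidWin g 6 7 A6 A x := by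
    intro x q
    unfold ResWin at q
    unfold MidWin
    rw [e320, e464]
    rcases q with q | q | q | q | q | q | q | q | q | q | q | q
    · exact Or.inl q
    · exact Or.inr (Or.inl q)
    · exact Or.inr (Or.inr (Or.inl q))
    · exact Or.inr (Or.inr (Or.inr (Or.inl q)))
    · exact Or.inr (Or.inr (Or.inr (Or.inr (Or.inl q))))
    · exact Or.inr (Or.inr (Or.inr (Or.inr (Or.inr (Or.inl (by omega))))))
    · exact Or.inr (Or.inr (Or.inr (Or.inr (Or.inr (Or.inr (Or.inl q))))))
    · exact Or.inr (Or.inr (Or.inr (Or.inr (Or.inr (Or.inr (Or.inr (Or.inl q)))))))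
    · exact Or.inr (Or.inr (Or.inr (Or.inr (Or.inr (Or.inr (Or.inr (Or.inr (Or.inl q))))))))
    · refine Or.inr (Or.inr (Or.inr (Or.inr (Or.inr (Or.inr (Or.inr (Or.inr (Or.inr ?_))))))))
      apply Young.of_since harena h.mid.extc hconfS
      simp only []
      omega
    · refine Or.inr (Or.inr (Or.inr (Or.inr (Or.inr (Or.inr (Or.inr (Or.inr (Or.inr ?_))))))))
      apply Young.of_since harena h.mid.extc hconfS
      simp only []
      omega
    · refine Or.inr (Or.inr (Or.inr (Or.inr (Or.inr (Or.inr (Or.inr (Or.inr (Or.inr ?_))))))))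
      exact ⟨q.1, q.2.1, fun B hB => q.2.2 B ((hB.mono hres.ext6).mono hres.ext6c)⟩
  have hmw : ∀ x, x ∈ ws → MidWin g 6 7 A6 A x ∨ (g.R + 0x10 ≤ x.lo ∧ x.hi ≤ g.R + 0x28) := by
    intro x hx
    rcases hok x hx with q | q
    · exact Or.inl (hmw0 x q)
    · exact Or.inr (by omega)
  have hsw : ∀ x, x ∈ ws → SecWin g A x := by
    intro x hx
    rcases hok x hx with q | q
    · exact (hmw0 x q).secWin
    · unfold SecWin
      exact Or.inr (Or.inl (by omega))
  -- the frame constants: no window meets `[R + 8, R + 18H)` or `[R + 20H, R + 28H)`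
  have hlo : Mem.EqOn (g.R + 8) (g.R + 0x18) v.mem w.mem := by
    apply hs.eqOn
    intro x hx
    rcases hok x hx with q | q
    · unfold ResWin Young at q
      omega
    · omega
  have hhi : Mem.EqOn (g.R + 0x20) (g.R + 0x28) v.mem w.mem := by
    apply hs.eqOn
    intro x hx
    rcases hok x hx with q | q
    · unfold ResWin Young at q
      omega
    · omega
  have hRlt : g.R + 0x28 ≤ 2 ^ 64 := by omega
  have hconsts : SDFrameConsts 6 w.mem g.R := by
    obtain ⟨c1, c2, c3, c4, c5⟩ := h.mid.consts
    refine ⟨c1, ?_, ?_, ?_, ?_⟩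
    · rw [hlo.u64 (g.R + 8) (by omega) (by omega) (by omega)]
      exact c2
    · rw [hhi.u32 (g.R + 0x20) (by omega) (by omega) (by omega)]
      exact c3
    · intro hk
      rw [hlo.u8 (g.R + 0x10) (by omega) (by omega) (by omega)]
      exact c4 hk
    · intro hk1 hk2
      rw [hhi.u32 (g.R + 0x24) (by omega) (by omega) (by omega)]
      exact c5 hk1 hk2
  -- the windows of `*f` that RES(i) reads
  have he : ObjEq (Res.wins i) v.mem g.f w.mem g.f := by
    apply ObjEq.of_sameExcept hs
    · intro x hx
      simp only [Res.wins, List.mem_cons, List.mem_nil_iff, or_false] at hx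
      rcases hx with rfl | rfl | rfl
      all_goals simp only []
      all_goals omega
    · intro x hx s hs'
      simp only [Res.wins, List.mem_cons, List.mem_nil_iff, or_false] at hx
      rcases hok s hs' with q | q
      · unfold ResWin Young at q
        rcases hx with rfl | rfl | rfl
        all_goals simp only []
        all_goals omega
      · rcases hx with rfl | rfl | rfl
        all_goals simp only []
        all_goals omega
  -- a block of the snapshot `Ai` is missed by every young window
  have hold : ∀ {B : Block}, Ai.Blk B → ∀ x, Young Ai A x → B.base + B.size ≤ x.lo ∨ x.hi ≤ B.base := by
    intro B hB x hx
    exact hx.2.2 B hB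
  -- the finished records
  have hrec : ∀ i', i' < i →
      (Block.mk (stb_vorbis.residue_config_at v.mem g.f i') Off.sizeof.Residue).Kept v.mem w.mem := by
    intro i' hi'
    have e : stb_vorbis.residue_config_at v.mem g.f i' = stb_vorbis.residue_config v.mem g.f + 32 * i' := by
      simp only [vacc, voff]
    rw [e, hsz]
    apply Res.blk_kept hp hs hok
    · simp only []
      omega
    · intro x hx
      have := hold hconfAi x hx
      simp only [] at this ⊢
      omega
    · simp only []
      omega
  -- the `classdata` field of every record
  have hcd : ∀ i' : Nat, (i' : Int) < stb_vorbis.residue_count v.mem g.f →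
      (Block.mk (stb_vorbis.residue_config_at v.mem g.f i' + 16) 8).Kept v.mem w.mem := by
    intro i' hi'
    have e : stb_vorbis.residue_config_at v.mem g.f i' = stb_vorbis.residue_config v.mem g.f + 32 * i' := by
      simp only [vacc, voff]
    rw [e]
    apply Res.blk_kept hp hs hok
    · simp only []
      omega
    · intro x hx
      have := hold hconfAi x hx
      simp only [] at this ⊢
      omega
    · simp only []
      omega
  -- the codebooks block: a block of the configuration arena
  have hcbA6 : A6.Blk (codebooksBlock v.mem g.f) :=
    ((h.mid.own.cb0 (by omega)).ok (h.mid.own.nonnull (by omega))).F2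
  have hcb : (codebooksBlock v.mem g.f).Kept v.mem w.mem := by
    have hcbA : A.1.Blk (codebooksBlock v.mem g.f) := hcbA6.mono h.mid.extc
    have hd : (codebooksBlock v.mem g.f).base + (codebooksBlock v.mem g.f).size ≤ stb_vorbis.residue_config v.mem g.f ∨
        stb_vorbis.residue_config v.mem g.f + 32 * (stb_vorbis.residue_count v.mem g.f).toNat ≤
          (codebooksBlock v.mem g.f).base :=
      arena_disjoint harena hcbA hconfS.1 (Since.ne_old hcbA6 hconfS)
    apply Res.blk_kept hp hs hok
    · exact arena_inside harena hcbA
    · exact hold ((hcbA6.mono hres.ext6).mono hres.ext6c)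
    · left
      omega
  -- the blocks of the finished records
  have hyoung : ∀ B, Since A6c Ai B → B.Kept v.mem w.mem := by
    intro B hB
    have hBA : A.1.Blk B := hB.1.mono hres.exti
    have hd := arena_disjoint harena hBA hconfS.1 (Since.ne_old hres.R2.1 hB).symm
    simp only [vblock] at hd
    apply Res.blk_kept hp hs hok
    · exact arena_inside harena hBA
    · exact hold hB.1
    · left
      omega
  exact
    { frame := h.frame.carry_sec hp hs hun hsw hrip hrsp hcode hinv
      hand := h.hand
      mid := h.mid.carry_spill hp hs hun hmw hbits hconsts
      i_le := by
        rw [Res.count_same he]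
        exact h.i_le
      res := hres.carry_obj he hrec hcb hyoung
      zero := Res.zero_carry h.zero he hcd }

/-- **THE RECORD OF THE ITERATION IS KEPT** by a step none of whose windows lies in the record (`hoff`: no window is one of `ResWin`'s
two record arms — a call return, a store into `residue_books` / `classdata` / a row, a spill): the hypothesis `hr` of
`ResCur.carry_obj` and of `ResidueReads.of_kept`. (`Res.blk_kept` is for the OTHER blocks: its `hrec` excludes the record.) -/
theorem ResLoop.rec_kept {u₀ : State} {g : Ghost} {pc : Word} {i zf : Nat} {A6 A6c Ai : Arena} {A : Arena × List Obj}
    {v : State} {m' : Mem} {ws : List Span} (h : ResLoop u₀ g pc i zf A6 A6c Ai A v)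
    (hlt : (i : Int) < stb_vorbis.residue_count v.mem g.f) (hs : Mem.SameExcept ws v.mem m')
    (hok : ∀ x, x ∈ ws → ResWin g i (resAt g v.mem i) Ai A x ∨ (g.R + 0x18 ≤ x.lo ∧ x.hi ≤ g.R + 0x20))
    (hoff : ∀ x, x ∈ ws → ¬ (resAt g v.mem i ≤ x.lo ∧ x.hi ≤ resAt g v.mem i + 16) ∧
      ¬ (resAt g v.mem i + 24 ≤ x.lo ∧ x.hi ≤ resAt g v.mem i + 32)) :
    (Block.mk (resAt g v.mem i) Off.sizeof.Residue).Kept v.mem m' := by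
  have hp : Pos g A := Pos.of_mid h.frame h.hand h.mid
  have harena := h.mid.arena
  have hres := h.res
  have h1 := hres.R1
  have p1 := hp.r_eq
  have p2 := hp.ra_lo
  have p3 := hp.ra_hi
  have p4 := hp.objOut
  have p5 := hp.ar_stack
  have p6 := hp.ar_hi
  have hconfAi : Ai.Blk ⟨stb_vorbis.residue_config v.mem g.f,
      Off.sizeof.Residue * (stb_vorbis.residue_count v.mem g.f).toNat⟩ := hres.R2.1.mono hres.ext6c
  have hconfIn := arena_inside harena (hconfAi.mono hres.exti)
  simp only [] at hconfIn
  have hsz : Off.sizeof.Residue = 32 := by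
    simp only [voff]
  have hr : resAt g v.mem i = stb_vorbis.residue_config v.mem g.f + 32 * i := by
    simp only [resAt, vacc, voff]
  rw [hsz] at hconfAi hconfIn ⊢
  apply Block.Kept.of_sameExcept hs
  · intro x hx
    have ho := hoff x hx
    simp only []
    rcases hok x hx with q | q
    · unfold ResWin at q
      rcases q with q | q | q | q | q | q | q | q | q | q | q | q
      · omega
      · omega
      · omega
      · omega
      · omega
      · omega
      · omega
      · omega
      · omega
      · exact absurd q ho.1
      · exact absurd q ho.2
      · have hd := q.2.2 _ hconfAi
        simp only [] at hd
        omega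
    · omega
  · simp only []
    omega

/-- **THE CARRY LEMMA OF THE RESIDUE LOOP** (`ResLoop.carry` of the proactive-split plan): the invariant of loop 4043 from the cut
point `v` to the state `w` (a call return, the next cut point), inside iteration `i` (`hlt : i < residue_count`), over ONE
footprint `hs` (`u_same` chains the segment's own stores, the pushed return addresses and the callees' footprints) whose every
window is a `ResWin g i (resAt g v.mem i) Ai A`. The ghost arena stays (`setup_malloc`: `SecPt.alloc_call`), no shadow byte is
written (`hun`: `v_untouched` / the callee's post). `hbits`: the reader's post (`hpost.bits.bits`), else `bits_kept`. The registers
of the individual body (`rbp` / `r13 = f`, `rbx = r`, `r14d = i` …) are the body's own lines (`w_kept`). With a spill into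
`[R + 18H, R + 20H)`: `ResLoop.carry_spill`. -/
theorem ResLoop.carry {u₀ : State} {g : Ghost} {pc pc' : Word} {i zf : Nat} {A6 A6c Ai : Arena} {A : Arena × List Obj}
    {v w : State} {ws : List Span} (h : ResLoop u₀ g pc i zf A6 A6c Ai A v)
    (hlt : (i : Int) < stb_vorbis.residue_count v.mem g.f)
    (hs : Mem.SameExcept ws v.mem w.mem) (hun : ShadowUntouched v.mem w.mem)
    (hok : ∀ x, x ∈ ws → ResWin g i (resAt g v.mem i) Ai A x) (hbits : Bits (g.Blk A) g.len w.mem g.f)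
    (hrip : w.rip = pc') (hrsp : w.reg .rsp = addr g.R) (hcode : CodeOK u₀ w.mem) (hinv : abiInv w) :
    ResLoop u₀ g pc' i zf A6 A6c Ai A w :=
  h.carry_spill hlt hs hun (fun x hx => Or.inl (hok x hx)) hbits hrip hrsp hcode hinv

end Vorbis.Spec.StartDecoder
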